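-- pv_equiv track=rewrite | github.com/REGINALDOLEMELEME/AUTO_CIFRA | src/docx_export.py | _split_line_on_punctuation
-- ===== SOURCE A (Python) =====
-- from typing import Any
--
-- def _split_line_on_punctuation(
--     words: list[dict[str, Any]], max_words: int = 12
-- ) -> list[list[dict[str, Any]]]:
--     if len(words) <= max_words:
--         return [words]
--     break_chars = (",", ";", ".", ":", "!", "?")
--     break_idx = [
--         i for i, w in enumerate(words)
--         if str(w.get("text", "")).strip().endswith(break_chars)
--     ]
--     if not break_idx:
--         return [words[i:i + max_words] for i in range(0, len(words), max_words)]
--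
--     chunks: list[list[dict[str, Any]]] = []
--     start = 0
--     while start < len(words):
--         limit = min(start + max_words, len(words))
--         candidates = [i for i in break_idx if start <= i < limit]
--         if not candidates and limit == len(words):
--             chunks.append(words[start:limit])
--             break
--         if not candidates:
--             chunks.append(words[start:limit])
--             start = limit
--             continue
--         cut = candidates[-1] + 1
--         chunks.append(words[start:cut])
--         start = cut
--     return [c for c in chunks if c]
-- ===== SOURCE B (Python) =====
-- from typing import Any
--
-- def _split_line_on_punctuation(
--     words: list[dict[str, Any]], max_words: int = 12
-- ) -> list[list[dict[str, Any]]]: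
--     if len(words) <= max_words:
--         return [words]
--     break_chars = (",", ";", ".", ":", "!", "?")
--     breaks = [
--         i for i, w in enumerate(words)
--         if str(w.get("text", "")).strip().endswith(break_chars)
--     ]
--     n = len(words)
--     chunks: list[list[dict[str, Any]]] = []
--     start = 0
--     k = 0  # pointer into breaks: everything before k lies before start
--     while start < n:
--         limit = min(start + max_words, n)
--         cut = limit
--         while k < len(breaks) and breaks[k] < limit:
--             cut = breaks[k] + 1
--             k += 1
--         chunks.append(words[start:cut])
--         start = cut
--     return chunks
-- ===== Notes on version B (the rewrite author's own statement) =====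
-- stated objective: alternative
-- what changed: A rescans the whole break-index list to collect candidates for every window; B advances a single pointer through the (sorted) break-index list so each break index is visited once, which also removes A's separate no-break fast path and its trailing empty-chunk filter.
-- outside the precondition, e.g. on _split_line_on_punctuation([{'text': 'a'}], -1): A returns [], B does not finish within the time limit; on _split_line_on_punctuation([], -1): A returns [], B returns []
import Mathlib
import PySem

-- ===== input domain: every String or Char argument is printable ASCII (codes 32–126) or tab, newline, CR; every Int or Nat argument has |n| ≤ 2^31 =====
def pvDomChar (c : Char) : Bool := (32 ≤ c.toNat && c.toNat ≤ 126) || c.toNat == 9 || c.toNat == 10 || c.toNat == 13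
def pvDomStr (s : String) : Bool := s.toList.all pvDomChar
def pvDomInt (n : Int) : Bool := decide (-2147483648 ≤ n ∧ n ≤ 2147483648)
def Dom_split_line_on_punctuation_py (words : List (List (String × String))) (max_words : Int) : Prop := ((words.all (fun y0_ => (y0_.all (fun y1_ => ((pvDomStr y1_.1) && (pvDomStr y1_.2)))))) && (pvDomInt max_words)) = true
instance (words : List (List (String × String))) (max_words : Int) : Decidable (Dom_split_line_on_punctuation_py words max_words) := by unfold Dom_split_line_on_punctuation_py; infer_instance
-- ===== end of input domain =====

-- B replaces A's per-window rescan of the whole break-index list by a single advancing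
-- pointer into it (two-pointer / merge style), visiting each break index once.

-- ===== PORT A =====

-- str(w.get("text", "")).strip().endswith((",",";",".",":","!","?")) — dict lookup is
-- first match on the association list; str() of the already-string value is the identity.
def pvIsBreak (w : List (String × String)) : Bool :=
  let t := PySem.Str.strip ((List.lookup "text" w).getD "")
  PySem.Str.endswith t "," || PySem.Str.endswith t ";" || PySem.Str.endswith t "." ||
  PySem.Str.endswith t ":" || PySem.Str.endswith t "!" || PySem.Str.endswith t "?"

-- [i for i, w in enumerate(words) if …] — the identical comprehension appears in A and B
def pvBreakIdx (words : List (List (String × String))) : List Int :=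
  ((PySem.List.enumerate words).filter (fun p => pvIsBreak p.2)).map (fun p => p.1)

-- A's while-loop; fuel (words.length+1) is an upper bound on its iterations wherever the
-- Python loop terminates (start strictly increases), a totality guard only.
def pvALoop (words : List (List (String × String))) (mw : Int) (bidx : List Int) :
    Nat → Int → List (List (List (String × String))) → List (List (List (String × String)))
  | 0, _, chunks => chunks
  | fuel+1, start, chunks =>
    if start < (words.length : Int) then
      let limit := min (start + mw) ((words.length : Int))
      let candidates := bidx.filter (fun i => decide (start ≤ i) && decide (i < limit))
      if candidates.isEmpty && (limit == (words.length : Int)) then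
        chunks ++ [PySem.List.slice words (some start) (some limit)]
      else if candidates.isEmpty then
        pvALoop words mw bidx fuel limit (chunks ++ [PySem.List.slice words (some start) (some limit)])
      else
        pvALoop words mw bidx fuel (PySem.List.pyGetD candidates (-1) 0 + 1)
          (chunks ++ [PySem.List.slice words (some start) (some (PySem.List.pyGetD candidates (-1) 0 + 1))])
    else chunks

def split_line_on_punctuation_py (words : List (List (String × String))) (max_words : Int) :
    List (List (List (String × String))) :=
  if (words.length : Int) ≤ max_words then [words]
  else
    let bidx := pvBreakIdx words
    if bidx.isEmpty then
      (PySem.List.pyRange 0 (words.length : Int) max_words).map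
        (fun i => PySem.List.slice words (some i) (some (i + max_words)))
    else
      (pvALoop words max_words bidx (words.length + 1) 0 []).filter (fun c => !c.isEmpty)

-- ===== PORT B =====

-- B's inner while: advance the pointer k over breaks while breaks[k] < limit, remembering
-- breaks[k]+1 as the cut; terminates because k increases towards breaks.length.
def pvBScan (breaks : List Int) (limit : Int) (k : Nat) (cut : Int) : Int × Nat :=
  if h : k < breaks.length then
    if breaks[k] < limit then pvBScan breaks limit (k+1) (breaks[k] + 1)
    else (cut, k)
  else (cut, k)
termination_by breaks.length - k

-- B's outer while; same totality fuel as A's port.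
def pvBLoop (words : List (List (String × String))) (mw : Int) (breaks : List Int) :
    Nat → Int → Nat → List (List (List (String × String))) → List (List (List (String × String)))
  | 0, _, _, chunks => chunks
  | fuel+1, start, k, chunks =>
    if start < (words.length : Int) then
      let limit := min (start + mw) ((words.length : Int))
      let r := pvBScan breaks limit k limit
      pvBLoop words mw breaks fuel r.1 r.2
        (chunks ++ [PySem.List.slice words (some start) (some r.1)])
    else chunks

def split_line_on_punctuation_py_alt (words : List (List (String × String))) (max_words : Int) :
    List (List (List (String × String))) :=
  if (words.length : Int) ≤ max_words then [words]
  else pvBLoop words max_words (pvBreakIdx words) (words.length + 1) 0 0 []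

-- ===== PRECONDITION & SPEC =====

-- Pre_ restricts to a positive chunk size (or a line that already fits), the natural domain:
-- for non-positive max_words with words present A raises ValueError or loops forever, except
-- that with a negative max_words and no break-marked words A accidentally returns [] (empty
-- negative-step range) where B's loop does not terminate; on ([], negative) both return [].
def Pre_split_line_on_punctuation_py (words : List (List (String × String))) (max_words : Int) : Prop :=
  1 ≤ max_words ∨ (words.length : Int) ≤ max_words
instance (words : List (List (String × String))) (max_words : Int) :
    Decidable (Pre_split_line_on_punctuation_py words max_words) := by
  unfold Pre_split_line_on_punctuation_py; infer_instance

def pvWitness_split_line_on_punctuation_py : (List (List (String × String))) × Int :=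
  ([[("text", "a,")], [("text", "b")], [("text", "c")]], 2)

def Spec_split_line_on_punctuation_py (words : List (List (String × String))) (max_words : Int)
    (out : List (List (List (String × String)))) : Prop :=
  out = split_line_on_punctuation_py_alt words max_words
instance (words : List (List (String × String))) (max_words : Int)
    (out : List (List (List (String × String)))) :
    Decidable (Spec_split_line_on_punctuation_py words max_words out) := by
  unfold Spec_split_line_on_punctuation_py; infer_instance

-- ===== CLAIM (what is proved, stated in full; the proofs are below) =====
def Claim_equal_split_line_on_punctuation_py : Prop := ∀ (words : List (List (String × String))) (max_words : Int), Dom_split_line_on_punctuation_py words max_words → Pre_split_line_on_punctuation_py words max_words → Spec_split_line_on_punctuation_py words max_words (split_line_on_punctuation_py words max_words)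

-- ===== LEMMAS AND PROOFS =====

lemma pvBreakIdx_sorted (words : List (List (String × String))) :
    (pvBreakIdx words).Pairwise (· < ·) := by
  unfold pvBreakIdx
  exact List.Pairwise.map _ (fun a b h => h)
    ((PySem.List.pairwise_lt_enumerate words 0).filter _)

lemma pvBreakIdx_bound (words : List (List (String × String))) :
    ∀ i ∈ pvBreakIdx words, 0 ≤ i ∧ i < (words.length : Int) := by
  intro i hi
  unfold pvBreakIdx at hi
  simp only [List.mem_map, List.mem_filter] at hi
  obtain ⟨p, ⟨hp, _⟩, rfl⟩ := hi
  rw [PySem.List.mem_enumerate_iff] at hp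
  obtain ⟨k, hk, rfl⟩ := hp
  refine ⟨by simp, by simp; omega⟩

lemma pvBScan_eq (breaks : List Int) (limit : Int) : ∀ (k : Nat) (cut : Int),
    pvBScan breaks limit k cut =
      (((breaks.drop k).takeWhile (fun i => decide (i < limit))).getLastD (cut - 1) + 1,
       k + ((breaks.drop k).takeWhile (fun i => decide (i < limit))).length) := by
  intro k cut
  fun_induction pvBScan breaks limit k cut with
  | case1 k cut h hlt ih =>
    rw [List.drop_eq_getElem_cons h, List.takeWhile_cons, if_pos (by simpa using hlt), ih]
    have h1 : breaks[k] + 1 - 1 = breaks[k] := by omega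
    rw [h1, List.getLastD_cons]
    simp; omega
  | case2 k cut h hlt =>
    rw [List.drop_eq_getElem_cons h, List.takeWhile_cons, if_neg (by simpa using hlt)]
    simp
  | case3 k cut h =>
    rw [List.drop_eq_nil_iff.mpr (by omega)]
    simp

lemma pvFilter_eq_takeWhile (limit : Int) : ∀ (l : List Int), l.Pairwise (· < ·) →
    l.filter (fun i => decide (i < limit)) = l.takeWhile (fun i => decide (i < limit)) := by
  intro l hl
  induction l with
  | nil => rfl
  | cons a l ih =>
    rcases hl with _ | ⟨ha, hl⟩
    by_cases h : a < limit
    · simp [h, ih hl]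
    · simp only [List.filter_cons, List.takeWhile_cons]
      simp [h, List.filter_eq_nil_iff]
      intro x hx
      have := ha x hx
      omega

lemma pvTakeWhile_nil_ge (limit : Int) (l : List Int) (hs : l.Pairwise (· < ·))
    (h : l.takeWhile (fun i => decide (i < limit)) = []) : ∀ i ∈ l, limit ≤ i := by
  intro i hi
  cases l with
  | nil => simp at hi
  | cons a l =>
    rcases hs with _ | ⟨ha, _⟩
    simp only [List.takeWhile_cons] at h
    by_cases hal : a < limit
    · simp [hal] at h
    · rcases List.mem_cons.mp hi with rfl | hm
      · omega
      · have := ha i hm; omega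

lemma pvMem_le_getLastD (l : List Int) (d : Int) (hs : l.Pairwise (· < ·)) :
    ∀ i ∈ l, i ≤ l.getLastD d := by
  intro i hi
  have hne : l ≠ [] := by rintro rfl; simp at hi
  rw [List.getLastD_eq_getLast?, List.getLast?_eq_some_getLast hne]
  simp only [Option.getD_some]
  rcases List.mem_iff_getElem.mp hi with ⟨j, hj, rfl⟩
  rw [List.getLast_eq_getElem]
  rcases Nat.lt_or_ge j (l.length - 1) with h | h
  · exact le_of_lt (List.pairwise_iff_getElem.mp hs j (l.length - 1) hj (by omega) h)
  · have : j = l.length - 1 := by omega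
    subst this; rfl

lemma pvSlice_ne_nil (l : List (List (String × String))) (a b : Int)
    (h0 : 0 ≤ a) (hab : a < b) (hn : a < (l.length : Int)) :
    PySem.List.slice l (some a) (some b) ≠ [] := by
  rw [PySem.List.slice_toNat l h0 (by omega)]
  intro h
  have := congrArg List.length h
  simp [List.length_take, List.length_drop] at this
  omega

lemma pvFilter_self (chunks : List (List (List (String × String))))
    (h : ∀ c ∈ chunks, c ≠ []) : chunks.filter (fun c => !c.isEmpty) = chunks := by
  apply List.filter_eq_self.mpr
  intro c hc
  simpa using h c hc

lemma pvRange_pos_cons (a b s : Int) (hs : 0 < s) (hab : a < b) :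
    PySem.List.pyRange a b s = a :: PySem.List.pyRange (a + s) b s := by
  rw [PySem.List.pyRange_of_pos a b hs, PySem.List.pyRange_of_pos (a+s) b hs]
  have h1 : ((b - a + s - 1) / s) = ((b - (a+s) + s - 1) / s) + 1 := by
    have : b - a + s - 1 = (b - (a+s) + s - 1) + 1 * s := by ring
    rw [this, Int.add_mul_ediv_right _ _ (by omega)]
  have h2 : 0 ≤ (b - (a+s) + s - 1) / s := by
    apply Int.ediv_nonneg <;> omega
  have h3 : (if a < b then ((b - a + s - 1) / s).toNat else 0)
      = ((b - (a+s) + s - 1) / s).toNat + 1 := by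
    rw [if_pos hab, h1]; omega
  rw [h3]
  by_cases hab2 : a + s < b
  · rw [if_pos hab2]
    rw [List.range_succ_eq_map]
    simp [List.map_map, Function.comp]
    intro k _; ring
  · rw [if_neg hab2]
    have : (b - (a+s) + s - 1) / s = 0 := by
      apply Int.ediv_eq_zero_of_lt <;> omega
    rw [this]
    simp [List.range_succ_eq_map]

lemma pvRange_pos_nil (a b s : Int) (hs : 0 < s) (hab : b ≤ a) :
    PySem.List.pyRange a b s = [] := by
  rw [PySem.List.pyRange_of_pos a b hs, if_neg (by omega)]
  simp

lemma pvBLoop_stop (words : List (List (String × String))) (mw : Int) (breaks : List Int)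
    (fuel : Nat) (start : Int) (k : Nat) (chunks : List (List (List (String × String))))
    (h : ¬ start < (words.length : Int)) :
    pvBLoop words mw breaks fuel start k chunks = chunks := by
  cases fuel with
  | zero => rfl
  | succ f => simp only [pvBLoop, if_neg h]

-- no-break path: B's loop produces exactly A's fixed-size comprehension
lemma pvNoBreak (words : List (List (String × String))) (mw : Int) (hmw : 1 ≤ mw) :
    ∀ (fuel : Nat) (start : Int) (k : Nat) (chunks : List (List (List (String × String)))),
    0 ≤ start → (words.length : Int) - start < (fuel : Int) →
    pvBLoop words mw [] fuel start k chunks =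
      chunks ++ (PySem.List.pyRange start (words.length : Int) mw).map
        (fun i => PySem.List.slice words (some i) (some (i + mw))) := by
  intro fuel
  induction fuel with
  | zero =>
    intro start k chunks h0 hf
    simp only [Nat.cast_zero] at hf
    rw [pvRange_pos_nil _ _ _ (by omega) (by omega)]
    simp [pvBLoop]
  | succ f ih =>
    intro start k chunks h0 hf
    by_cases hs : start < (words.length : Int)
    · simp only [pvBLoop, if_pos hs]
      rw [pvBScan_eq]
      simp only [List.drop_nil, List.takeWhile_nil, List.getLastD_nil, List.length_nil,
        Nat.add_zero]
      have hcut : min (start + mw) (words.length : Int) - 1 + 1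
          = min (start + mw) (words.length : Int) := by omega
      rw [hcut]
      set n : Int := (words.length : Int) with hn
      set limit : Int := min (start + mw) n with hlim
      have hlim1 : start < limit := by omega
      have hlim2 : limit ≤ n := by omega
      have hchunk : PySem.List.slice words (some start) (some limit)
          = PySem.List.slice words (some start) (some (start + mw)) := by
        rw [PySem.List.slice_toNat words h0 (by omega),
            PySem.List.slice_toNat words h0 (by omega)]
        rcases le_or_gt (start + mw) n with h | h
        · have : limit = start + mw := by omega
          rw [this]
        · have hl : limit = n := by omega
          rw [List.take_of_length_le, List.take_of_length_le]
          · simp only [List.length_drop]; omega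
          · simp only [List.length_drop]; omega
      rw [ih limit k _ (by omega) (by push_cast at hf ⊢; omega)]
      rw [pvRange_pos_cons start n mw (by omega) (by omega)]
      have hrest : PySem.List.pyRange (start + mw) n mw = PySem.List.pyRange limit n mw := by
        rcases le_or_gt (start + mw) n with h | h
        · have : limit = start + mw := by omega
          rw [this]
        · rw [pvRange_pos_nil _ _ _ (by omega) (by omega),
              pvRange_pos_nil _ _ _ (by omega) (by omega)]
      rw [← hrest]
      simp [hchunk]
    · rw [pvBLoop_stop _ _ _ _ _ _ _ hs,
          pvRange_pos_nil _ _ _ (by omega) (by omega)]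
      simp

-- main loop equivalence: A's rescanning loop (post-filtered) = B's two-pointer loop
lemma pvMain (words : List (List (String × String))) (mw : Int) (hmw : 1 ≤ mw) :
    ∀ (fuel : Nat) (start : Int) (k : Nat) (chunks : List (List (List (String × String)))),
    0 ≤ start → (words.length : Int) - start < (fuel : Int) → k ≤ (pvBreakIdx words).length →
    (∀ i ∈ (pvBreakIdx words).take k, i < start) →
    (∀ i ∈ (pvBreakIdx words).drop k, start ≤ i) →
    (∀ c ∈ chunks, c ≠ []) →
    (pvALoop words mw (pvBreakIdx words) fuel start chunks).filter (fun c => !c.isEmpty) =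
      pvBLoop words mw (pvBreakIdx words) fuel start k chunks := by
  set b : List Int := pvBreakIdx words with hbdef
  have hsort : b.Pairwise (· < ·) := pvBreakIdx_sorted words
  intro fuel
  induction fuel with
  | zero =>
    intro start k chunks h0 hf hk hlow hhigh hne
    simp only [pvALoop, pvBLoop]
    exact pvFilter_self _ hne
  | succ f ih =>
    intro start k chunks h0 hf hk hlow hhigh hne
    by_cases hs : start < ((words.length : Int))
    · simp only [pvALoop, pvBLoop]
      rw [if_pos hs, if_pos hs]
      set limit : Int := min (start + mw) ((words.length : Int)) with hlim
      have hlim1 : start < limit := by omega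
      have hlim2 : limit ≤ ((words.length : Int)) := by omega
      set t : List Int := ((b.drop k).takeWhile (fun i => decide (i < limit))) with htdef
      have hsortd : (b.drop k).Pairwise (· < ·) := hsort.sublist (List.drop_sublist _ _)
      have hcand : b.filter (fun i => decide (start ≤ i) && decide (i < limit)) = t := by
        conv_lhs => rw [← List.take_append_drop k b]
        rw [List.filter_append]
        have h1 : (b.take k).filter (fun i => decide (start ≤ i) && decide (i < limit)) = [] := by
          rw [List.filter_eq_nil_iff]
          intro i hi
          have := hlow i hi
          simp; omega
        have h2 : (b.drop k).filter (fun i => decide (start ≤ i) && decide (i < limit))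
            = (b.drop k).filter (fun i => decide (i < limit)) := by
          apply List.filter_congr
          intro i hi
          have := hhigh i hi
          simp; omega
        rw [h1, h2, pvFilter_eq_takeWhile _ _ hsortd, List.nil_append]
      rw [hcand, pvBScan_eq, ← htdef]
      have hchunkne : ∀ (c : Int), start < c →
          PySem.List.slice words (some start) (some c) ≠ [] :=
        fun c hc => pvSlice_ne_nil words start c h0 hc (by omega)
      by_cases ht : t = []
      · simp only [ht, List.isEmpty_nil, List.getLastD_nil, List.length_nil, Bool.true_and,
          Nat.add_zero]
        have hcut : limit - 1 + 1 = limit := by omega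
        rw [hcut]
        by_cases hl : limit = ((words.length : Int))
        · rw [if_pos (beq_iff_eq.mpr hl)]
          rw [pvBLoop_stop _ _ _ _ _ _ _ (by omega)]
          rw [List.filter_append, pvFilter_self _ hne]
          simp [hchunkne limit hlim1]
        · rw [if_neg (fun hc => hl (beq_iff_eq.mp hc))]
          rw [if_pos trivial]
          exact ih limit k _ (by omega) (by omega) hk
            (fun i hi => lt_trans (hlow i hi) hlim1)
            (pvTakeWhile_nil_ge limit _ hsortd ht)
            (by intro c hc
                rcases List.mem_append.mp hc with h | h
                · exact hne c h
                · simp at h; rw [h]; exact hchunkne limit hlim1)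
      · have htne : t.isEmpty = false := by simpa [List.isEmpty_iff] using ht
        simp only [htne, Bool.false_and, Bool.false_eq_true, if_false]
        have hlast : PySem.List.pyGetD t (-1) 0 = t.getLastD (limit - 1) := by
          rw [PySem.List.pyGetD_neg_one t 0 ht, List.getLastD_eq_getLast?,
              List.getLast?_eq_some_getLast ht]
          rfl
        rw [hlast]
        set cut : Int := t.getLastD (limit - 1) + 1 with hcut
        have hlastmem : t.getLastD (limit - 1) ∈ t := by
          rw [List.getLastD_eq_getLast?, List.getLast?_eq_some_getLast ht]
          exact List.getLast_mem ht
        have htsubd : ∀ i ∈ t, i ∈ b.drop k := fun i hi =>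
          (List.takeWhile_sublist _).subset hi
        have hcut1 : start < cut := by
          have := hhigh _ (htsubd _ hlastmem)
          omega
        have hcut2 : cut ≤ limit := by
          have h2 := List.mem_takeWhile_imp hlastmem
          simp only [decide_eq_true_eq] at h2
          omega
        have hsortt : t.Pairwise (· < ·) := hsortd.sublist (List.takeWhile_sublist _)
        have htake : b.take (k + t.length) = b.take k ++ t := by
          rw [List.take_add]
          congr 1
          have hpre : t <+: b.drop k := List.takeWhile_prefix _
          rcases hpre with ⟨r, hr⟩
          rw [← hr, List.take_left']
          rfl
        have hdrop : b.drop (k + t.length) = (b.drop k).dropWhile (fun i => decide (i < limit)) := by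
          rw [← List.drop_drop]
          conv_lhs => rw [show b.drop k = t ++ (b.drop k).dropWhile (fun i => decide (i < limit)) from
            (List.takeWhile_append_dropWhile).symm]
          rw [List.drop_left]
        have hlen : t.length ≤ (b.drop k).length :=
          List.Sublist.length_le (List.takeWhile_sublist _)
        have h0c : 0 ≤ cut := by omega
        have hfc : ((words.length : Int)) - cut < (f : Int) := by
          push_cast at hf ⊢; omega
        apply ih cut (k + t.length) _ h0c hfc
        · rw [List.length_drop] at hlen
          omega
        · rw [htake]
          intro i hi
          rcases List.mem_append.mp hi with h | h
          · have := hlow i h; omega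
          · have := pvMem_le_getLastD t (limit - 1) hsortt i h
            omega
        · rw [hdrop]
          intro i hi
          have hpw : ∀ x ∈ t, ∀ y ∈ (b.drop k).dropWhile (fun i => decide (i < limit)), x < y := by
            have h2 := hsortd
            conv at h2 => rw [show b.drop k = t ++ (b.drop k).dropWhile (fun i => decide (i < limit)) from
              (List.takeWhile_append_dropWhile).symm]
            exact (List.pairwise_append.mp h2).2.2
          have := hpw _ hlastmem i hi
          omega
        · intro c hc
          rcases List.mem_append.mp hc with h | h
          · exact hne c h
          · simp at h; rw [h]; exact hchunkne cut hcut1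
    · simp only [pvALoop, pvBLoop]
      rw [if_neg hs, if_neg hs]
      exact pvFilter_self _ hne

-- ===== VERDICT (by name: the statement is the Claim_ definition above) =====
theorem split_line_on_punctuation_py_spec : Claim_equal_split_line_on_punctuation_py := by
  intro words mw _ hpre
  unfold Spec_split_line_on_punctuation_py
  unfold split_line_on_punctuation_py split_line_on_punctuation_py_alt
  by_cases hle : (words.length : Int) ≤ mw
  · rw [if_pos hle, if_pos hle]
  · rw [if_neg hle, if_neg hle]
    have hmw : 1 ≤ mw := by
      rcases hpre with h | h
      · exact h
      · exact absurd h hle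
    by_cases hb : (pvBreakIdx words).isEmpty
    · rw [if_pos hb]
      rw [List.isEmpty_iff.mp hb]
      rw [pvNoBreak words mw hmw (words.length + 1) 0 0 [] le_rfl (by push_cast; omega)]
      simp
    · rw [if_neg hb]
      exact pvMain words mw hmw (words.length + 1) 0 0 [] le_rfl (by push_cast; omega)
        (Nat.zero_le _) (by simp) (by simpa using fun i hi => (pvBreakIdx_bound words i hi).1)
        (by simp)
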